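-- pv_equiv track=rewrite | github.com/AmineMOULAI/WisFast-AI | wisfast/services/search_strategies.py | extract_snippet
-- ===== SOURCE A (Python) =====
-- from typing import List, Dict, Any
--
-- def extract_snippet(query_tokens: List[str], raw_text: str, snippet_length: int = 50) -> str:
--     words = raw_text.split()
--     if not words:
--         return ""
--
--     # Simple snippet extraction: find first match
--     lower_words = [w.lower() for w in words]
--     best_idx = 0
--     for token in query_tokens:
--         try:
--             best_idx = lower_words.index(token)
--             break
--         except ValueError:
--             continue
--
--     start_idx = max(0, best_idx - snippet_length // 2)
--     end_idx = min(len(words), start_idx + snippet_length)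
--     snippet = " ".join(words[start_idx:end_idx])
--
--     if start_idx > 0:
--         snippet = "..." + snippet
--     if end_idx < len(words):
--         snippet = snippet + "..."
--
--     return snippet
-- ===== SOURCE B (Python) =====
-- def extract_snippet(query_tokens, raw_text, snippet_length=50):
--     words = raw_text.split()
--     if not words:
--         return ""
--
--     # Single pass over the WORDS (not the tokens): rank each word by the position
--     # of its first matching query token, and keep the earliest word of minimal rank.
--     rank = {}
--     for r, t in enumerate(query_tokens):
--         rank.setdefault(t, r)
--
--     best = None  # (token_rank, word_index); strict '<' keeps the earliest word per rank
--     for i, w in enumerate(words):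
--         r = rank.get(w.lower())
--         if r is not None and (best is None or r < best[0]):
--             best = (r, i)
--     best_idx = best[1] if best is not None else 0
--
--     start = max(0, best_idx - snippet_length // 2)
--     end = min(len(words), start + snippet_length)
--     prefix = "..." if start > 0 else ""
--     suffix = "..." if end < len(words) else ""
--     return prefix + " ".join(words[start:end]) + suffix
-- ===== Notes on version B (the rewrite author's own statement) =====
-- stated objective: faster
-- what changed: Inverts the traversal: instead of scanning the word list once per query token (list.index inside a token loop), B ranks the tokens once, then makes a single pass over the words keeping the earliest word whose token rank is minimal.
import Mathlib
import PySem

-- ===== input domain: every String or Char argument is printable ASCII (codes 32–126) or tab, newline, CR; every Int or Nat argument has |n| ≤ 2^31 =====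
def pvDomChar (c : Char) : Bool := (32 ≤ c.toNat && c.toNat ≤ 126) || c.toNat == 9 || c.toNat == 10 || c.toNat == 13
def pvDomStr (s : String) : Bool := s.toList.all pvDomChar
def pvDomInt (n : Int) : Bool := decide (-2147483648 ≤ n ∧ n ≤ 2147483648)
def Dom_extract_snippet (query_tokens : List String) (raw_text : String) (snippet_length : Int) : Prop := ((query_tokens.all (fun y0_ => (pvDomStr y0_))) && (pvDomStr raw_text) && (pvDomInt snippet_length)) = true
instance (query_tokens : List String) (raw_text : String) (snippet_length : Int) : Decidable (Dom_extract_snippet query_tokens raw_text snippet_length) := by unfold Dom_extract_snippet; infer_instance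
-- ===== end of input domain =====

-- B inverts the traversal: instead of scanning the word list once per query token
-- (list.index inside a token loop), it ranks the tokens once and makes a single pass
-- over the words, keeping the earliest word of minimal token rank; values are proved equal.

-- ===== PORT A =====
-- 'for token in query_tokens: try: best_idx = lower_words.index(token); break; except: continue'
def aFindIdx (lower_words : List String) : List String → Int
  | [] => 0
  | t :: ts =>
    match PySem.List.index? lower_words t with
    | some i => (i : Int)
    | none => aFindIdx lower_words ts

def extract_snippet (query_tokens : List String) (raw_text : String) (snippet_length : Int) : String :=
  let words := PySem.Str.split₀ raw_text
  if words = [] then "" else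
  let lower_words := words.map PySem.Str.lower
  let best_idx := aFindIdx lower_words query_tokens
  let start_idx := max 0 (best_idx - PySem.Int.floordiv snippet_length 2)
  let end_idx := min ((words.length : Int)) (start_idx + snippet_length)
  let snippet := PySem.Str.join " " (PySem.List.slice words (some start_idx) (some end_idx))
  let snippet := if start_idx > 0 then "..." ++ snippet else snippet
  let snippet := if end_idx < (words.length : Int) then snippet ++ "..." else snippet
  snippet

-- ===== PORT B =====
-- 'for r, t in enumerate(query_tokens): rank.setdefault(t, r)'
def bRank (query_tokens : List String) : PySem.Dict String Int :=
  (PySem.List.enumerate query_tokens).foldl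
    (fun d p => d.setdefault p.2 p.1) PySem.Dict.empty

-- loop body of 'for i, w in enumerate(words): r = rank.get(w.lower()); if r is not None and (best is None or r < best[0]): best = (r, i)'
def bStep (rank : PySem.Dict String Int) (best : Option (Int × Int)) (p : Int × String) : Option (Int × Int) :=
  match rank.get? (PySem.Str.lower p.2) with
  | none => best
  | some r =>
    match best with
    | none => some (r, p.1)
    | some b => if r < b.1 then some (r, p.1) else some b

def extract_snippet_alt (query_tokens : List String) (raw_text : String) (snippet_length : Int) : String :=
  let words := PySem.Str.split₀ raw_text
  if words = [] then "" else
  let rank := bRank query_tokens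
  let best := (PySem.List.enumerate words).foldl (bStep rank) none
  let best_idx := match best with | some b => b.2 | none => 0
  let start := max 0 (best_idx - PySem.Int.floordiv snippet_length 2)
  let stop := min ((words.length : Int)) (start + snippet_length)
  let pre := if start > 0 then "..." else ""
  let suf := if stop < (words.length : Int) then "..." else ""
  pre ++ PySem.Str.join " " (PySem.List.slice words (some start) (some stop)) ++ suf

-- ===== PRECONDITION & SPEC =====
def Spec_extract_snippet (query_tokens : List String) (raw_text : String) (snippet_length : Int) (out : String) : Prop := out = extract_snippet_alt query_tokens raw_text snippet_length
instance (query_tokens : List String) (raw_text : String) (snippet_length : Int) (out : String) : Decidable (Spec_extract_snippet query_tokens raw_text snippet_length out) := by unfold Spec_extract_snippet; infer_instance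

-- ===== CLAIM (what is proved, stated in full; the proofs are below) =====
def Claim_equal_extract_snippet : Prop := ∀ (query_tokens : List String) (raw_text : String) (snippet_length : Int), Dom_extract_snippet query_tokens raw_text snippet_length → Spec_extract_snippet query_tokens raw_text snippet_length (extract_snippet query_tokens raw_text snippet_length)

-- ===== LEMMAS AND PROOFS =====

-- proof-side version of bStep with the dict lookup replaced by index? into the token list
def stepC (toks : List String) (best : Option (Int × Int)) (p : Int × String) : Option (Int × Int) :=
  match PySem.List.index? toks (PySem.Str.lower p.2) with
  | none => best
  | some r =>
    match best with
    | none => some ((r : Int), p.1)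
    | some b => if (r : Int) < b.1 then some ((r : Int), p.1) else some b

-- the rank dict records each token's first position
theorem bRank_fold_get? (toks : List String) (s : Int) (d : PySem.Dict String Int) (t : String) :
    ((PySem.List.enumerate toks s).foldl (fun d p => d.setdefault p.2 p.1) d).get? t =
    ((d.get? t).orElse (fun _ =>
      (PySem.List.index? toks t).map (fun n => s + (n : Int)))) := by
  induction toks generalizing s d with
  | nil => simp [PySem.List.enumerate, PySem.List.index?_eq_idxOf?]
  | cons w ws ih =>
    rw [PySem.List.enumerate_cons]
    simp only [List.foldl_cons]
    rw [ih]
    by_cases ht : t = w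
    · subst ht
      rw [PySem.Dict.get?_setdefault_self, PySem.List.index?_cons_self]
      cases h : d.get? t with
      | some v => simp
      | none => simp
    · rw [PySem.Dict.get?_setdefault_of_ne _ _ ht,
          PySem.List.index?_cons_of_ne _ (fun h => ht h.symm)]
      cases d.get? t with
      | some v => simp
      | none =>
        simp only [Option.orElse]
        cases PySem.List.index? ws t with
        | none => simp
        | some n => simp; ring

theorem bRank_get? (toks : List String) (t : String) :
    (bRank toks).get? t = (PySem.List.index? toks t).map (fun n => (n : Int)) := by
  unfold bRank
  rw [bRank_fold_get? toks 0 PySem.Dict.empty t]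
  simp [PySem.Dict.get?_empty]

-- the word-scan fold with the dict equals the fold with index? into the tokens
theorem fold_bStep_eq (toks : List String) (ps : List (Int × String)) (best : Option (Int × Int)) :
    ps.foldl (bStep (bRank toks)) best = ps.foldl (stepC toks) best := by
  induction ps generalizing best with
  | nil => rfl
  | cons p ps ih =>
    simp only [List.foldl_cons]
    have hstep : bStep (bRank toks) best p = stepC toks best p := by
      unfold bStep stepC
      rw [bRank_get?]
      cases PySem.List.index? toks (PySem.Str.lower p.2) with
      | none => rfl
      | some r => rfl
    rw [hstep, ih]

-- with no tokens, the scan never updates best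
theorem fold_stepC_nil (ps : List (Int × String)) (best : Option (Int × Int)) :
    ps.foldl (stepC []) best = best := by
  induction ps generalizing best with
  | nil => rfl
  | cons p ps ih =>
    simp only [List.foldl_cons]
    have : stepC [] best p = best := by
      unfold stepC
      simp [PySem.List.index?_eq_idxOf?]
    rw [this, ih]

-- once the best rank is 0, nothing later replaces it (all ranks are Nat-casts, hence ≥ 0)
theorem fold_stepC_zero_fixed (toks : List String) (ps : List (Int × String)) (j : Int) :
    ps.foldl (stepC toks) (some (0, j)) = some (0, j) := by
  induction ps with
  | nil => rfl
  | cons p ps ih =>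
    simp only [List.foldl_cons]
    have : stepC toks (some (0, j)) p = some (0, j) := by
      unfold stepC
      cases h : PySem.List.index? toks (PySem.Str.lower p.2) with
      | none => rfl
      | some r =>
        have : ¬ ((r : Int) < 0) := by omega
        simp [this]
    rw [this, ih]

-- if some word's lowercase equals the head token, the scan ends at the first such word
theorem fold_stepC_zero_wins (t : String) (ts : List String) (ps : List (Int × String))
    (best : Option (Int × Int)) (hbest : ∀ b, best = some b → 0 < b.1) (p₀ : Int × String)
    (hfind : ps.find? (fun p => PySem.Str.lower p.2 == t) = some p₀) :
    ps.foldl (stepC (t :: ts)) best = some (0, p₀.1) := by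
  induction ps generalizing best with
  | nil => simp at hfind
  | cons p ps ih =>
    simp only [List.foldl_cons]
    by_cases hp : PySem.Str.lower p.2 = t
    · have hp₀ : p₀ = p := by
        rw [List.find?_cons_of_pos (by simp [hp])] at hfind
        exact (Option.some.inj hfind).symm
      rw [hp₀]
      have hstep : stepC (t :: ts) best p = some (0, p.1) := by
        unfold stepC
        rw [hp, PySem.List.index?_cons_self]
        cases hb : best with
        | none => rfl
        | some b =>
          have := hbest b hb
          simp only [Nat.cast_zero]
          rw [if_pos this]
      rw [hstep]
      exact fold_stepC_zero_fixed _ _ _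
    · rw [List.find?_cons_of_neg (by simp [hp])] at hfind
      have hinv : ∀ b, stepC (t :: ts) best p = some b → 0 < b.1 := by
        intro b hb
        unfold stepC at hb
        cases h : PySem.List.index? (t :: ts) (PySem.Str.lower p.2) with
        | none => rw [h] at hb; exact hbest b hb
        | some r =>
          rw [h] at hb
          have hr : r ≠ 0 := by
            intro h0; subst h0
            obtain ⟨hk, he, _⟩ := PySem.List.getElem_of_index?_eq_some h
            exact hp he.symm
          have hrpos : (0 : Int) < (r : Int) := by
            exact_mod_cast Nat.pos_of_ne_zero hr
          cases hbv : best with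
          | none =>
            rw [hbv] at hb
            cases hb; exact hrpos
          | some bb =>
            rw [hbv] at hb
            simp only at hb
            split_ifs at hb with hlt
            · cases hb; exact hrpos
            · cases hb; exact hbest _ hbv
      exact ih _ hinv hfind

-- if no word matches the head token, the head only shifts every rank by one
theorem fold_stepC_shift (t : String) (ts : List String) (ps : List (Int × String))
    (best : Option (Int × Int)) (hne : ∀ p ∈ ps, PySem.Str.lower p.2 ≠ t) :
    ps.foldl (stepC (t :: ts)) (best.map (fun b => (b.1 + 1, b.2))) =
    (ps.foldl (stepC ts) best).map (fun b => (b.1 + 1, b.2)) := by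
  induction ps generalizing best with
  | nil => rfl
  | cons p ps ih =>
    simp only [List.foldl_cons]
    have hp : PySem.Str.lower p.2 ≠ t := hne p (by simp)
    have hcons : PySem.List.index? (t :: ts) (PySem.Str.lower p.2) =
        (PySem.List.index? ts (PySem.Str.lower p.2)).map (· + 1) :=
      PySem.List.index?_cons_of_ne _ (fun h => hp h.symm)
    have hstep : stepC (t :: ts) (best.map (fun b => (b.1 + 1, b.2))) p =
        (stepC ts best p).map (fun b => (b.1 + 1, b.2)) := by
      unfold stepC
      rw [hcons]
      cases h : PySem.List.index? ts (PySem.Str.lower p.2) with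
      | none => rfl
      | some r =>
        cases best with
        | none => simp only [Option.map_none, Option.map_some]; push_cast; ring_nf
        | some b =>
          have hiff : ((r + 1 : Nat) : Int) < b.1 + 1 ↔ (r : Int) < b.1 := by
            push_cast; omega
          simp only [Option.map_some]
          by_cases hlt : (r : Int) < b.1
          · rw [if_pos (hiff.mpr hlt), if_pos hlt]
            simp only [Option.map_some]; push_cast; ring_nf
          · rw [if_neg (fun h => hlt (hiff.mp h)), if_neg hlt]
            rfl
    rw [hstep]
    exact ih (stepC ts best p) (fun q hq => hne q (by simp [hq]))

-- find? over the enumeration locates the first occurrence index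
theorem find?_enumerate_lower (t : String) (words : List String) (s : Int) :
    ((PySem.List.enumerate words s).find? (fun p => PySem.Str.lower p.2 == t)).map Prod.fst =
    (PySem.List.index? (words.map PySem.Str.lower) t).map (fun n => s + (n : Int)) := by
  induction words generalizing s with
  | nil => simp [PySem.List.enumerate, PySem.List.index?_eq_idxOf?]
  | cons w ws ih =>
    rw [PySem.List.enumerate_cons]
    by_cases hw : PySem.Str.lower w = t
    · rw [List.find?_cons_of_pos (by simp [hw]), List.map_cons, hw,
          PySem.List.index?_cons_self]
      simp
    · rw [List.find?_cons_of_neg (by simp [hw]), List.map_cons,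
          PySem.List.index?_cons_of_ne _ hw, ih]
      cases h : PySem.List.index? (ws.map PySem.Str.lower) t with
      | none => simp
      | some n => simp; ring

-- main bridge: B's single word-scan returns A's token-loop index
theorem scan_eq_aFindIdx (toks words : List String) :
    (match (PySem.List.enumerate words).foldl (stepC toks) none with
      | some b => b.2 | none => 0) = aFindIdx (words.map PySem.Str.lower) toks := by
  induction toks with
  | nil => rw [fold_stepC_nil]; rfl
  | cons t ts ih =>
    unfold aFindIdx
    cases hidx : PySem.List.index? (words.map PySem.Str.lower) t with
    | some i₀ =>
      have hf := find?_enumerate_lower t words 0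
      rw [hidx] at hf
      simp at hf
      obtain ⟨w₀, hfind⟩ := hf
      rw [fold_stepC_zero_wins t ts _ none (by simp) ((i₀ : Int), w₀) hfind]
    | none =>
      have hne : ∀ p ∈ PySem.List.enumerate words (0 : Int), PySem.Str.lower p.2 ≠ t := by
        intro p hp hcontra
        have hmem : p.2 ∈ words := by
          rw [PySem.List.mem_enumerate_iff] at hp
          obtain ⟨k, hk, rfl⟩ := hp
          exact List.getElem_mem hk
        have : t ∈ words.map PySem.Str.lower := hcontra ▸ List.mem_map_of_mem hmem
        rw [← PySem.List.index?_isSome_iff] at this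
        rw [hidx] at this; simp at this
      have := fold_stepC_shift t ts (PySem.List.enumerate words (0 : Int)) none hne
      simp only [Option.map_none] at this
      rw [this]
      rw [← ih]
      cases (PySem.List.enumerate words (0 : Int)).foldl (stepC ts) none with
      | none => rfl
      | some b => rfl

-- ===== VERDICT (by name: the statement is the Claim_ definition above) =====
theorem extract_snippet_spec : Claim_equal_extract_snippet := by
  intro query_tokens raw_text snippet_length _
  unfold Spec_extract_snippet extract_snippet extract_snippet_alt
  by_cases hw : PySem.Str.split₀ raw_text = []
  · simp [hw]
  · simp only [hw, if_false]
    rw [fold_bStep_eq, scan_eq_aFindIdx]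
    split_ifs <;> simp [String.append_assoc, String.append_empty, String.empty_append]
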